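-- pv_equiv track=rewrite | github.com/ijaffrey/claw_contractor | lead_summary_formatter.py | _categorize_responses
-- ===== SOURCE A (Python) =====
-- from typing import Dict, List, Optional, Any, Tuple
--
-- def _categorize_responses(
--     responses: Dict[str, Any]
-- ) -> Dict[str, List[Tuple[str, Any]]]:
--     """Categorize customer responses by topic."""
--     categories = {
--         "contact_info": [],
--         "problem_details": [],
--         "property_info": [],
--         "preferences": [],
--         "other": [],
--     }
--
--     contact_keywords = ["name", "phone", "email", "address", "contact"]
--     problem_keywords = [
--         "issue",
--         "problem",
--         "damage",
--         "repair",
--         "broken",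
--         "leak",
--         "emergency",
--     ]
--     property_keywords = ["property", "home", "building", "room", "area", "location"]
--     preference_keywords = ["prefer", "schedule", "time", "budget", "timeline"]
--
--     for question, answer in responses.items():
--         if question.lower() == "timestamp":
--             continue
--
--         question_lower = question.lower()
--         categorized = False
--
--         for keyword in contact_keywords:
--             if keyword in question_lower:
--                 categories["contact_info"].append((question, answer))
--                 categorized = True
--                 break
--
--         if not categorized:
--             for keyword in problem_keywords:
--                 if keyword in question_lower:
--                     categories["problem_details"].append((question, answer))
--                     categorized = True
--                     break
--
--         if not categorized:
--             for keyword in property_keywords: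
--                 if keyword in question_lower:
--                     categories["property_info"].append((question, answer))
--                     categorized = True
--                     break
--
--         if not categorized:
--             for keyword in preference_keywords:
--                 if keyword in question_lower:
--                     categories["preferences"].append((question, answer))
--                     categorized = True
--                     break
--
--         if not categorized:
--             categories["other"].append((question, answer))
--
--     return categories
-- ===== SOURCE B (Python) =====
-- from typing import Dict, List, Any, Tuple
--
--
-- def _categorize_responses(
--     responses: Dict[str, Any]
-- ) -> Dict[str, List[Tuple[str, Any]]]:
--     """Categorize customer responses by topic (label-then-filter formulation)."""
--     table = [
--         ("contact_info", ["name", "phone", "email", "address", "contact"]),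
--         ("problem_details",
--          ["issue", "problem", "damage", "repair", "broken", "leak", "emergency"]),
--         ("property_info",
--          ["property", "home", "building", "room", "area", "location"]),
--         ("preferences", ["prefer", "schedule", "time", "budget", "timeline"]),
--     ]
--
--     def label(question):
--         ql = question.lower()
--         for name, kws in table:
--             if any(k in ql for k in kws):
--                 return name
--         return "other"
--
--     items = [(q, a) for q, a in responses.items() if q.lower() != "timestamp"]
--     return {
--         name: [qa for qa in items if label(qa[0]) == name]
--         for name in ("contact_info", "problem_details", "property_info",
--                      "preferences", "other")
--     }
-- ===== Notes on version B (the rewrite author's own statement) =====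
-- stated objective: simpler
-- what changed: Replaces the single pass that mutates five buckets through a categorized-flag and four unrolled keyword loops by a table-driven label function plus one per-category filter comprehension; Pre_ excludes association lists with duplicate keys, which cannot arise from the Python dict argument.
import Mathlib
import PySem

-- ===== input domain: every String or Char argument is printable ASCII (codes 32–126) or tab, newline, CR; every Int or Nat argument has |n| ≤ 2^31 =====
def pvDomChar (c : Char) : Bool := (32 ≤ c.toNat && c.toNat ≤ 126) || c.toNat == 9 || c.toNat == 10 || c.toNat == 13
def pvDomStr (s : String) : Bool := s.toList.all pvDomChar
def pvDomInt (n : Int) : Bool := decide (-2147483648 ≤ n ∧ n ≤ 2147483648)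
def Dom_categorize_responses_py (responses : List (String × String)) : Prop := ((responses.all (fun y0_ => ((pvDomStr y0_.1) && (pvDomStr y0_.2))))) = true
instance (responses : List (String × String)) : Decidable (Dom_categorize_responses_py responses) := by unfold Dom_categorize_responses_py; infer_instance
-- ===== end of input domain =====

-- B replaces A's one mutating pass with a categorized-flag and four unrolled keyword loops
-- by a table-driven label function and one filter per category (simpler decomposition).

-- any(keyword in ql for keyword in kws)  (used by both ports' keyword tests)
def pvHit (kws : List String) (ql : String) : Bool :=
  kws.any (fun k => PySem.Str.isIn k ql)

-- ===== PORT A =====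
-- one iteration of A's `for question, answer in responses.items()` loop
def pvA_step (categories : PySem.Dict String (List (String × String)))
    (qa : String × String) : PySem.Dict String (List (String × String)) :=
  match qa with
  | (question, answer) =>
    if PySem.Str.lower question == "timestamp" then categories
    else
      let ql := PySem.Str.lower question
      -- categorized flag + four keyword loops with break = first matching branch
      if pvHit ["name", "phone", "email", "address", "contact"] ql then
        categories.modify "contact_info" [] (fun l => l ++ [(question, answer)])
      else if pvHit ["issue", "problem", "damage", "repair", "broken", "leak", "emergency"] ql then
        categories.modify "problem_details" [] (fun l => l ++ [(question, answer)])
      else if pvHit ["property", "home", "building", "room", "area", "location"] ql then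
        categories.modify "property_info" [] (fun l => l ++ [(question, answer)])
      else if pvHit ["prefer", "schedule", "time", "budget", "timeline"] ql then
        categories.modify "preferences" [] (fun l => l ++ [(question, answer)])
      else
        categories.modify "other" [] (fun l => l ++ [(question, answer)])

def categorize_responses_py (responses : List (String × String)) :
    List (String × List (String × String)) :=
  (responses.foldl pvA_step
    (PySem.Dict.mk [("contact_info", []), ("problem_details", []),
      ("property_info", []), ("preferences", []), ("other", [])])).items

-- ===== PORT B =====
def pvB_table : List (String × List String) :=
  [ ("contact_info", ["name", "phone", "email", "address", "contact"]),
    ("problem_details", ["issue", "problem", "damage", "repair", "broken", "leak", "emergency"]),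
    ("property_info", ["property", "home", "building", "room", "area", "location"]),
    ("preferences", ["prefer", "schedule", "time", "budget", "timeline"]) ]

-- B's `label`: the for-loop with early return is List.find?, the fall-through is "other"
def pvB_label (question : String) : String :=
  let ql := PySem.Str.lower question
  ((pvB_table.find? (fun nk => pvHit nk.2 ql)).map Prod.fst).getD "other"

def categorize_responses_py_alt (responses : List (String × String)) :
    List (String × List (String × String)) :=
  let items := responses.filter (fun p => !(PySem.Str.lower p.1 == "timestamp"))
  (["contact_info", "problem_details", "property_info", "preferences", "other"]).map
    (fun name => (name, items.filter (fun qa => pvB_label qa.1 == name)))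

-- ===== PRECONDITION & SPEC =====
-- Pre_ excludes association lists with duplicate keys: A's argument is a Python dict,
-- which cannot hold two entries with the same key, so such lists represent no input of A.
def Pre_categorize_responses_py (responses : List (String × String)) : Prop :=
  (responses.map Prod.fst).Nodup
instance (responses : List (String × String)) : Decidable (Pre_categorize_responses_py responses) := by unfold Pre_categorize_responses_py; infer_instance
def pvWitness_categorize_responses_py : (List (String × String)) :=
  [("Your Name?", "Bob"), ("leak in the ROOM", "yes"), ("misc", "x")]
def Spec_categorize_responses_py (responses : List (String × String)) (out : List (String × List (String × String))) : Prop := out = categorize_responses_py_alt responses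
instance (responses : List (String × String)) (out : List (String × List (String × String))) : Decidable (Spec_categorize_responses_py responses out) := by unfold Spec_categorize_responses_py; infer_instance

-- ===== CLAIM (what is proved, stated in full; the proofs are below) =====
def Claim_equal_categorize_responses_py : Prop := ∀ (responses : List (String × String)), Dom_categorize_responses_py responses → Pre_categorize_responses_py responses → Spec_categorize_responses_py responses (categorize_responses_py responses)

-- ===== LEMMAS AND PROOFS =====

-- what B puts into the bucket `name`
def pvCat (name : String) (l : List (String × String)) : List (String × String) :=
  (l.filter (fun p => !(PySem.Str.lower p.1 == "timestamp"))).filter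
    (fun qa => pvB_label qa.1 == name)

theorem pvCat_cons_ts (name q a : String) (rest : List (String × String))
    (ht : (PySem.Str.lower q == "timestamp") = true) :
    pvCat name ((q, a) :: rest) = pvCat name rest := by
  simp [pvCat, ht]

theorem pvCat_cons (name q a : String) (rest : List (String × String))
    (ht : (PySem.Str.lower q == "timestamp") = false) :
    pvCat name ((q, a) :: rest) =
      (if pvB_label q == name then [(q, a)] else []) ++ pvCat name rest := by
  by_cases hc : (pvB_label q == name) = true <;> simp [pvCat, ht, hc]

-- A's step on a non-timestamp item extends exactly the bucket B labels it with
theorem pvA_step_eq (q a : String) (x1 x2 x3 x4 x5 : List (String × String))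
    (ht : (PySem.Str.lower q == "timestamp") = false) :
    pvA_step (PySem.Dict.mk [("contact_info", x1), ("problem_details", x2),
      ("property_info", x3), ("preferences", x4), ("other", x5)]) (q, a)
    = PySem.Dict.mk
      [("contact_info", if pvB_label q == "contact_info" then x1 ++ [(q, a)] else x1),
       ("problem_details", if pvB_label q == "problem_details" then x2 ++ [(q, a)] else x2),
       ("property_info", if pvB_label q == "property_info" then x3 ++ [(q, a)] else x3),
       ("preferences", if pvB_label q == "preferences" then x4 ++ [(q, a)] else x4),
       ("other", if pvB_label q == "other" then x5 ++ [(q, a)] else x5)] := by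
  by_cases h1 : pvHit ["name", "phone", "email", "address", "contact"]
      (PySem.Str.lower q) = true <;>
  by_cases h2 : pvHit ["issue", "problem", "damage", "repair", "broken", "leak", "emergency"]
      (PySem.Str.lower q) = true <;>
  by_cases h3 : pvHit ["property", "home", "building", "room", "area", "location"]
      (PySem.Str.lower q) = true <;>
  by_cases h4 : pvHit ["prefer", "schedule", "time", "budget", "timeline"]
      (PySem.Str.lower q) = true <;>
  simp_all [pvA_step, pvB_label, pvB_table, List.find?,
    PySem.Dict.modify, PySem.Dict.insert, PySem.Dict.getD, PySem.Dict.get?,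
    PySem.Dict.contains]

-- loop invariant: A's foldl extends each of the five buckets by B's filter for it
theorem pvA_loop_inv (l : List (String × String))
    (x1 x2 x3 x4 x5 : List (String × String)) :
    (l.foldl pvA_step (PySem.Dict.mk [("contact_info", x1), ("problem_details", x2),
      ("property_info", x3), ("preferences", x4), ("other", x5)])).items
    = [("contact_info", x1 ++ pvCat "contact_info" l),
       ("problem_details", x2 ++ pvCat "problem_details" l),
       ("property_info", x3 ++ pvCat "property_info" l),
       ("preferences", x4 ++ pvCat "preferences" l),
       ("other", x5 ++ pvCat "other" l)] := by
  induction l generalizing x1 x2 x3 x4 x5 with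
  | nil => simp [pvCat]
  | cons qa rest ih =>
    obtain ⟨q, a⟩ := qa
    by_cases ht : (PySem.Str.lower q == "timestamp") = true
    · have hstep : pvA_step (PySem.Dict.mk [("contact_info", x1), ("problem_details", x2),
          ("property_info", x3), ("preferences", x4), ("other", x5)]) (q, a)
          = PySem.Dict.mk [("contact_info", x1), ("problem_details", x2),
            ("property_info", x3), ("preferences", x4), ("other", x5)] := by
        simp [pvA_step, ht]
      rw [List.foldl_cons, hstep, ih]
      simp [pvCat_cons_ts _ _ _ _ ht]
    · rw [List.foldl_cons, pvA_step_eq q a x1 x2 x3 x4 x5 (by simpa using ht), ih]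
      simp only [pvCat_cons _ _ _ _ (by simpa using ht)]
      split_ifs <;> simp

theorem categorize_responses_py_eq (responses : List (String × String)) :
    categorize_responses_py responses = categorize_responses_py_alt responses := by
  unfold categorize_responses_py categorize_responses_py_alt
  rw [pvA_loop_inv]
  simp [pvCat, List.map]

-- ===== VERDICT (by name: the statement is the Claim_ definition above) =====
theorem categorize_responses_py_spec : Claim_equal_categorize_responses_py := by
  intro responses _ _
  unfold Spec_categorize_responses_py
  exact categorize_responses_py_eq responses
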